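-- pv_equiv track=rewrite | github.com/ddisisto/autoloop | autoloop/semantic.py | _shares_morph_root
-- ===== SOURCE A (Python) =====
-- def _shares_morph_root(word: str, theme: str, min_prefix: int = 4) -> bool:
--     """Check if word shares a morphological root with theme via shared prefix."""
--     if len(word) < min_prefix or len(theme) < min_prefix:
--         return False
--     shared = 0
--     for i in range(min(len(word), len(theme))):
--         if word[i] != theme[i]:
--             break
--         shared += 1
--     return shared >= min_prefix
-- ===== SOURCE B (Python) =====
-- def _shares_morph_root(word: str, theme: str, min_prefix: int = 4) -> bool:
--     """Check if word shares a morphological root with theme via shared prefix."""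
--     if len(word) < min_prefix or len(theme) < min_prefix:
--         return False
--     k = max(min_prefix, 0)
--     return word[:k] == theme[:k]
-- ===== Notes on version B (the rewrite author's own statement) =====
-- stated objective: faster
-- what changed: Replaced the per-character counting loop over the whole common prefix by a single closed-form slice comparison word[:k] == theme[:k] with k = max(min_prefix, 0), which inspects only the first min_prefix characters.
import Mathlib
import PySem

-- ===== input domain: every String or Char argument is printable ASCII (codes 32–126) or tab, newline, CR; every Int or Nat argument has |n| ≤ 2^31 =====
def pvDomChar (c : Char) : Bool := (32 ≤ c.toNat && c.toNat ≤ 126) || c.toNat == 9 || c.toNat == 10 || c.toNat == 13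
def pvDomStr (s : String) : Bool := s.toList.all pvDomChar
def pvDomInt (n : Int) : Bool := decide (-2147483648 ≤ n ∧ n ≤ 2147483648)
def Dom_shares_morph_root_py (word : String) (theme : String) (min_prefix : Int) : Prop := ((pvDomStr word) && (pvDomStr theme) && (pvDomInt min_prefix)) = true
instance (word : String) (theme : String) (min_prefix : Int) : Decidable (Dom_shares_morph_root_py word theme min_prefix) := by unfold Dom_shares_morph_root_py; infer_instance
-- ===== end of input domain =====

-- B replaces A's character-counting loop by one closed-form slice comparison (simpler).

-- ===== PORT A =====
-- A's `for i in range(min(len,len)): if word[i] != theme[i]: break; shared += 1`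
-- as structural recursion on the remaining iteration count (i = current index).
def pvALoop (w t : List Char) : Nat → Nat → Int → Int
  | _, 0, shared => shared
  | i, f + 1, shared =>
    if w[i]? ≠ t[i]? then shared else pvALoop w t (i + 1) f (shared + 1)

def shares_morph_root_py (word : String) (theme : String) (min_prefix : Int) : Bool :=
  let w := word.toList
  let t := theme.toList
  if (w.length : Int) < min_prefix ∨ (t.length : Int) < min_prefix then false
  else decide (pvALoop w t 0 (min w.length t.length) 0 ≥ min_prefix)

-- ===== PORT B =====
def shares_morph_root_py_alt (word : String) (theme : String) (min_prefix : Int) : Bool :=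
  let w := word.toList
  let t := theme.toList
  if (w.length : Int) < min_prefix ∨ (t.length : Int) < min_prefix then false
  else
    let k := max min_prefix 0
    decide (PySem.List.slice w none (some k) = PySem.List.slice t none (some k))

-- ===== PRECONDITION & SPEC =====
def Spec_shares_morph_root_py (word : String) (theme : String) (min_prefix : Int) (out : Bool) : Prop := out = shares_morph_root_py_alt word theme min_prefix
instance (word : String) (theme : String) (min_prefix : Int) (out : Bool) : Decidable (Spec_shares_morph_root_py word theme min_prefix out) := by unfold Spec_shares_morph_root_py; infer_instance

-- ===== CLAIM (what is proved, stated in full; the proofs are below) =====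
def Claim_equal_shares_morph_root_py : Prop := ∀ (word : String) (theme : String) (min_prefix : Int), Dom_shares_morph_root_py word theme min_prefix → Spec_shares_morph_root_py word theme min_prefix (shares_morph_root_py word theme min_prefix)

-- ===== LEMMAS AND PROOFS =====

theorem pvALoop_mono (w t : List Char) (f i : Nat) (shared : Int) :
    shared ≤ pvALoop w t i f shared := by
  induction f generalizing i shared with
  | zero => simp [pvALoop]
  | succ f ih =>
    simp only [pvALoop]
    split
    · exact le_refl _
    · exact le_trans (by omega) (ih (i + 1) (shared + 1))

theorem pvALoop_char (w t : List Char) (f i : Nat) (shared : Int) (m : Nat) (hm : m ≤ f) :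
    (shared + m ≤ pvALoop w t i f shared ↔ ∀ j < m, w[i + j]? = t[i + j]?) := by
  induction f generalizing i shared m with
  | zero =>
    interval_cases m
    simp [pvALoop]
  | succ f ih =>
    simp only [pvALoop]
    split
    · rename_i hne
      constructor
      · intro hle j hj
        exfalso
        have : (m : Int) ≤ 0 := by omega
        have : m = 0 := by omega
        omega
      · intro hall
        rcases Nat.eq_zero_or_pos m with h0 | h0
        · simp [h0]
        · exact absurd (by simpa using hall 0 h0) hne
    · rename_i heq
      push_neg at heq
      rcases m with _ | m'
      · have h := pvALoop_mono w t f (i + 1) (shared + 1)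
        simp only [Nat.cast_zero, add_zero, Nat.not_lt_zero, false_implies,
          implies_true, iff_true]
        omega
      · have hrec := ih (i + 1) (shared + 1) m' (by omega)
        constructor
        · intro hle j hj
          rcases Nat.eq_zero_or_pos j with hj0 | hj0
          · simpa [hj0] using heq
          · have := (hrec.mp (by push_cast at hle ⊢; omega)) (j - 1) (by omega)
            have hji : i + 1 + (j - 1) = i + j := by omega
            rwa [hji] at this
        · intro hall
          have : ∀ j < m', w[i + 1 + j]? = t[i + 1 + j]? := by
            intro j hj
            have := hall (j + 1) (by omega)
            have hji : i + (j + 1) = i + 1 + j := by omega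
            rwa [hji] at this
          have := hrec.mpr this
          push_cast at this ⊢
          omega

theorem take_eq_iff_getElem? (w t : List Char) (m : Nat) :
    (w.take m = t.take m) ↔ ∀ j < m, w[j]? = t[j]? := by
  constructor
  · intro h j hj
    have := congrArg (fun l => l[j]?) h
    simpa [List.getElem?_take, hj] using this
  · intro h
    apply List.ext_getElem?
    intro j
    by_cases hj : j < m
    · simp [List.getElem?_take, hj, h j hj]
    · rw [List.getElem?_eq_none (by simp; omega), List.getElem?_eq_none (by simp; omega)]

-- ===== VERDICT (by name: the statement is the Claim_ definition above) =====
theorem shares_morph_root_py_spec : Claim_equal_shares_morph_root_py := by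
  intro word theme min_prefix _
  unfold Spec_shares_morph_root_py shares_morph_root_py shares_morph_root_py_alt
  set w := word.toList with hw
  set t := theme.toList with ht
  by_cases hg : (w.length : Int) < min_prefix ∨ (t.length : Int) < min_prefix
  · simp [hg]
  · simp only [hg, if_false]
    push_neg at hg
    by_cases hmp : min_prefix ≤ 0
    · have hmax : max min_prefix 0 = 0 := by omega
      have hA : min_prefix ≤ pvALoop w t 0 (min w.length t.length) 0 :=
        le_trans hmp (pvALoop_mono w t _ 0 0)
      rw [hmax, show (0 : Int) = ((0 : Nat) : Int) from rfl,
        PySem.List.slice_to_natCast, PySem.List.slice_to_natCast]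
      simp [hA]
    · push_neg at hmp
      set m := min_prefix.toNat with hm
      have hmmp : (m : Int) = min_prefix := by omega
      have hmf : m ≤ min w.length t.length := by omega
      have hchar := pvALoop_char w t (min w.length t.length) 0 0 m hmf
      simp only [zero_add] at hchar
      have hmax : max min_prefix 0 = (m : Int) := by omega
      rw [hmax]
      simp only [PySem.List.slice_to_natCast]
      rw [← take_eq_iff_getElem? w t m] at hchar
      simp only [ge_iff_le, ← hmmp, decide_eq_decide]
      exact hchar
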